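-- pv_equiv track=rewrite | github.com/corca-ai/charness | plugins/charness/scripts/inventory_quality_handoff.py | collect_bullets
-- ===== SOURCE A (Python) =====
-- def collect_bullets(lines: list[str]) -> list[str]:
--     bullets: list[str] = []
--     current: list[str] = []
--     for line in lines:
--         if line.startswith("- "):
--             if current:
--                 bullets.append(" ".join(current).strip())
--             current = [line[2:].strip()]
--             continue
--         if current and (line.startswith("  ") or not line.strip()):
--             current.append(line.strip())
--             continue
--         if current:
--             bullets.append(" ".join(current).strip())
--             current = []
--     if current:
--         bullets.append(" ".join(current).strip())
--     return bullets
-- ===== SOURCE B (Python) =====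
-- def collect_bullets(lines: list[str]) -> list[str]:
--     # Run-consuming parser: when a bullet head is found, an inner loop eats its
--     # whole continuation run at once; no flush state is carried between lines.
--     bullets: list[str] = []
--     i, n = 0, len(lines)
--     while i < n:
--         line = lines[i]
--         i += 1
--         if line.startswith("- "):
--             pieces = [line[2:].strip()]
--             while i < n and (lines[i].startswith("  ") or not lines[i].strip()):
--                 pieces.append(lines[i].strip())
--                 i += 1
--             bullets.append(" ".join(pieces).strip())
--     return bullets
-- ===== Notes on version B (the rewrite author's own statement) =====
-- stated objective: alternative
-- what changed: B replaces A's per-line state machine (an accumulator 'current' with three flush rules) by a run-consuming parser: an outer loop scans for bullet heads and, for each head, an inner loop consumes its entire continuation run at once and emits the joined bullet immediately, so no open-group state or flush logic exists between lines.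
import Mathlib
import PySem

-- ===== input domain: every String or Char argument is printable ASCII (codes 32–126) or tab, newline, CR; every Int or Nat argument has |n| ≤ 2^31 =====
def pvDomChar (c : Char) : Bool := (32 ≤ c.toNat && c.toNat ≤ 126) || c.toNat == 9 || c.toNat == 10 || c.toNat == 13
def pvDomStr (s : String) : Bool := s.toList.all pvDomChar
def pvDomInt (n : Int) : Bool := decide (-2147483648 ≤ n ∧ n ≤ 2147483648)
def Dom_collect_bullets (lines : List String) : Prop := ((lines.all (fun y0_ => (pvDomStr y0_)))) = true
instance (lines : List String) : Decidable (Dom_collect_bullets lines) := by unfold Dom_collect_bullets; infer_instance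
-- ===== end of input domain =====

-- B replaces A's per-line state machine with a run-consuming parser (alternative decomposition, same cost).

-- ===== PORT A =====
-- A's loop body: state (bullets, current); joins and flushes inline.
def pvStepA (st : List String × List String) (line : String) : List String × List String :=
  let bullets := st.1
  let current := st.2
  if PySem.Str.startswith line "- " then
    ((if current.isEmpty then bullets
      else bullets ++ [PySem.Str.strip (PySem.Str.join " " current)]),
     [PySem.Str.strip (PySem.Str.slice line (some 2) none)])
  else if !current.isEmpty && (PySem.Str.startswith line "  " || PySem.Str.strip line == "") then
    (bullets, current ++ [PySem.Str.strip line])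
  else if !current.isEmpty then
    (bullets ++ [PySem.Str.strip (PySem.Str.join " " current)], [])
  else
    (bullets, current)

-- A's trailing flush after the loop.
def pvFin (st : List String × List String) : List String :=
  if st.2.isEmpty then st.1
  else st.1 ++ [PySem.Str.strip (PySem.Str.join " " st.2)]

def collect_bullets (lines : List String) : List String :=
  pvFin (lines.foldl pvStepA ([], []))

-- ===== PORT B =====
-- B's inner while loop: the stripped continuation run at the front of the suffix.
def pvRun : List String → List String
  | [] => []
  | l :: rest =>
    if PySem.Str.startswith l "  " || PySem.Str.strip l == "" then
      PySem.Str.strip l :: pvRun rest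
    else []

-- B's outer while loop over the index i, as recursion on the suffix lines[i:];
-- the inner loop advancing i is pvRun plus the drop of the run it consumed.
def collect_bullets_alt : List String → List String
  | [] => []
  | line :: rest =>
    if PySem.Str.startswith line "- " then
      PySem.Str.strip (PySem.Str.join " "
        (PySem.Str.strip (PySem.Str.slice line (some 2) none) :: pvRun rest))
        :: collect_bullets_alt (rest.drop (pvRun rest).length)
    else collect_bullets_alt rest
termination_by ls => ls.length
decreasing_by
  · simp only [List.length_drop, List.length_cons]; omega
  · simp

-- ===== PRECONDITION & SPEC =====
def Spec_collect_bullets (lines : List String) (out : List String) : Prop := out = collect_bullets_alt lines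
instance (lines : List String) (out : List String) : Decidable (Spec_collect_bullets lines out) := by unfold Spec_collect_bullets; infer_instance

-- ===== CLAIM (what is proved, stated in full; the proofs are below) =====
def Claim_equal_collect_bullets : Prop := ∀ (lines : List String), Dom_collect_bullets lines → Spec_collect_bullets lines (collect_bullets lines)

-- ===== LEMMAS AND PROOFS =====

def pvJn (g : List String) : String := PySem.Str.strip (PySem.Str.join " " g)

-- A bullet-head line is never a continuation line.
theorem pv_bullet_not_cont (l : String) (h : PySem.Str.startswith l "- " = true) :
    (PySem.Str.startswith l "  " || PySem.Str.strip l == "") = false := by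
  obtain ⟨t, ht⟩ : ∃ t, l.toList = '-' :: ' ' :: t := by
    obtain ⟨u, hu⟩ := (PySem.Chars.startswith_iff _ _).mp (by simpa using h)
    exact ⟨u, by simpa using hu.symm⟩
  simp only [Bool.or_eq_false_iff]
  refine ⟨?_, ?_⟩
  · cases hb : PySem.Str.startswith l "  " with
    | false => rfl
    | true =>
      obtain ⟨u, hu⟩ := (PySem.Chars.startswith_iff _ _).mp (by simpa using hb)
      rw [ht] at hu
      simp at hu
  · cases hb : (PySem.Str.strip l == "") with
    | false => rfl
    | true =>
      have hnil : (PySem.Str.strip l).toList = [] := by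
        have : PySem.Str.strip l = "" := by simpa using hb
        simp [this]
      rw [PySem.Str.toList_strip, ht] at hnil
      have hl : PySem.Chars.lstrip ('-' :: ' ' :: t) = '-' :: ' ' :: t := by
        simp only [PySem.Chars.lstrip]
        rw [List.dropWhile_cons, if_neg (by decide)]
      rw [PySem.Chars.strip, hl] at hnil
      have hdw : List.dropWhile PySem.Chars.isspace (('-' :: ' ' :: t).reverse) = [] := by
        simpa [PySem.Chars.rstrip] using congrArg List.reverse hnil
      have := List.dropWhile_eq_nil_iff.mp hdw '-' (by simp)
      exact absurd this (by decide)

theorem pvAlt_nil : collect_bullets_alt [] = [] := by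
  simp only [collect_bullets_alt]

theorem pvAlt_cons_pos (l : String) (rest : List String)
    (h1 : PySem.Str.startswith l "- " = true) :
    collect_bullets_alt (l :: rest)
      = PySem.Str.strip (PySem.Str.join " "
          (PySem.Str.strip (PySem.Str.slice l (some 2) none) :: pvRun rest))
        :: collect_bullets_alt (rest.drop (pvRun rest).length) := by
  simp only [collect_bullets_alt]; rw [if_pos h1]

theorem pvAlt_cons_neg (l : String) (rest : List String)
    (h1 : ¬ PySem.Str.startswith l "- " = true) :
    collect_bullets_alt (l :: rest) = collect_bullets_alt rest := by
  simp only [collect_bullets_alt]; rw [if_neg h1]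

theorem pvRun_cons_pos (l : String) (rest : List String)
    (h2 : (PySem.Str.startswith l "  " || PySem.Str.strip l == "") = true) :
    pvRun (l :: rest) = PySem.Str.strip l :: pvRun rest := by
  simp only [pvRun]; rw [if_pos h2]

theorem pvRun_cons_neg (l : String) (rest : List String)
    (h2 : ¬ (PySem.Str.startswith l "  " || PySem.Str.strip l == "") = true) :
    pvRun (l :: rest) = [] := by
  simp only [pvRun]; rw [if_neg h2]

theorem pvStepA_dash (line : String) (b c : List String)
    (h1 : PySem.Str.startswith line "- " = true) :
    pvStepA (b, c) line
      = ((if c.isEmpty then b else b ++ [pvJn c]),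
         [PySem.Str.strip (PySem.Str.slice line (some 2) none)]) := by
  simp only [pvStepA, pvJn]; rw [if_pos h1]

theorem pvStepA_cont (line : String) (b c : List String)
    (h1 : ¬ PySem.Str.startswith line "- " = true)
    (h2 : (!c.isEmpty && (PySem.Str.startswith line "  " || PySem.Str.strip line == "")) = true) :
    pvStepA (b, c) line = (b, c ++ [PySem.Str.strip line]) := by
  simp only [pvStepA]; rw [if_neg h1, if_pos h2]

theorem pvStepA_close (line : String) (b c : List String)
    (h1 : ¬ PySem.Str.startswith line "- " = true)
    (h2 : ¬ (!c.isEmpty && (PySem.Str.startswith line "  " || PySem.Str.strip line == "")) = true)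
    (h3 : (!c.isEmpty) = true) :
    pvStepA (b, c) line = (b ++ [pvJn c], []) := by
  simp only [pvStepA, pvJn]; rw [if_neg h1, if_neg h2, if_pos h3]

theorem pvStepA_skip (line : String) (b : List String)
    (h1 : ¬ PySem.Str.startswith line "- " = true) :
    pvStepA (b, []) line = (b, []) := by
  simp only [pvStepA]
  rw [if_neg h1, if_neg (by simp), if_neg (by simp)]

-- Main invariant: A's fold, finished by the trailing flush, equals B's parser —
-- part 1 with no open group, part 2 with an open group cur, whose run B's pvRun captures.
theorem pv_main : ∀ (ls : List String),
    (∀ b : List String, pvFin (ls.foldl pvStepA (b, [])) = b ++ collect_bullets_alt ls) ∧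
    (∀ (b cur : List String), cur ≠ [] →
      pvFin (ls.foldl pvStepA (b, cur))
        = b ++ [pvJn (cur ++ pvRun ls)] ++ collect_bullets_alt (ls.drop (pvRun ls).length)) := by
  intro ls
  induction ls with
  | nil =>
    refine ⟨fun b => by simp [pvFin, pvAlt_nil], fun b cur hc => ?_⟩
    simp [pvFin, pvRun, pvAlt_nil, pvJn, List.isEmpty_iff, hc]
  | cons l rest ih =>
    obtain ⟨ihC, ihO⟩ := ih
    constructor
    · intro b
      simp only [List.foldl_cons]
      by_cases h1 : PySem.Str.startswith l "- " = true
      · rw [pvStepA_dash l b [] h1]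
        simp only [List.isEmpty_nil, if_pos]
        rw [ihO b [PySem.Str.strip (PySem.Str.slice l (some 2) none)] (by simp),
          pvAlt_cons_pos l rest h1]
        simp [pvJn]
      · rw [pvStepA_skip l b h1, ihC b, pvAlt_cons_neg l rest h1]
    · intro b cur hc
      simp only [List.foldl_cons]
      by_cases h1 : PySem.Str.startswith l "- " = true
      · rw [pvStepA_dash l b cur h1]
        rw [if_neg (by simpa [List.isEmpty_iff] using hc)]
        rw [ihO _ [PySem.Str.strip (PySem.Str.slice l (some 2) none)] (by simp)]
        rw [pvRun_cons_neg l rest (by rw [pv_bullet_not_cont l h1]; simp)]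
        simp only [List.length_nil, List.drop_zero]
        rw [pvAlt_cons_pos l rest h1]
        simp [pvJn]
      · by_cases h2 : (PySem.Str.startswith l "  " || PySem.Str.strip l == "") = true
        · rw [pvStepA_cont l b cur h1 (by rw [h2]; simpa [List.isEmpty_iff] using hc)]
          rw [ihO b (cur ++ [PySem.Str.strip l]) (by simp)]
          rw [pvRun_cons_pos l rest h2]
          simp
        · rw [pvStepA_close l b cur h1
            (by simp only [Bool.and_eq_true, not_and]; intro _; exact h2)
            (by simpa [List.isEmpty_iff] using hc)]
          rw [ihC (b ++ [pvJn cur]), pvRun_cons_neg l rest h2]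
          simp only [List.length_nil, List.drop_zero]
          rw [pvAlt_cons_neg l rest h1]
          simp

-- ===== VERDICT (by name: the statement is the Claim_ definition above) =====
theorem collect_bullets_spec : Claim_equal_collect_bullets := by
  intro lines _
  unfold Spec_collect_bullets collect_bullets
  simpa using (pv_main lines).1 []
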